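-- pv_equiv track=rewrite | github.com/NJiHyeon/Algorithm_Study | 프로그래머스/1/160586. 대충 만든 자판/대충 만든 자판.py | solution
-- ===== SOURCE A (Python) =====
-- def solution(keymap, targets):
--     result = []
--     for target in targets :
--         r = 0
--         l = []
--         for alpha in target :
--             a = []
--             for k in keymap :
--                 if alpha in k :
--                     a.append(k.index(alpha)+1)
--             if len(a) == 0 :
--                 l.append(0)
--             else :
--                 l.append(min(a))
--         if 0 in l :
--             result.append(0)
--         else :
--             result.append(sum(l))
--
--
--
--     real = []
--     for r in result :
--         if r==0 :
--             real.append(-1)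
--         else :
--             real.append(r)
--     return real
-- ===== SOURCE B (Python) =====
-- def solution(keymap, targets):
--     # One preprocessing pass: cheapest press count per character across all keymaps.
--     best = {}
--     for k in keymap:
--         for i, ch in enumerate(k):
--             if ch not in best or i + 1 < best[ch]:
--                 best[ch] = i + 1
--     def cost(target):
--         total = 0
--         for ch in target:
--             if ch not in best:
--                 return -1
--             total += best[ch]
--         return total if total > 0 else -1
--     return [cost(t) for t in targets]
-- ===== Notes on version B (the rewrite author's own statement) =====
-- stated objective: faster
-- what changed: B builds a per-character minimum-cost table once from all keymaps, then answers each target by a single lookup-and-sum pass with early exit, instead of A's rescanning every keymap for every character of every target and post-processing a 0-sentinel list.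
import Mathlib
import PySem

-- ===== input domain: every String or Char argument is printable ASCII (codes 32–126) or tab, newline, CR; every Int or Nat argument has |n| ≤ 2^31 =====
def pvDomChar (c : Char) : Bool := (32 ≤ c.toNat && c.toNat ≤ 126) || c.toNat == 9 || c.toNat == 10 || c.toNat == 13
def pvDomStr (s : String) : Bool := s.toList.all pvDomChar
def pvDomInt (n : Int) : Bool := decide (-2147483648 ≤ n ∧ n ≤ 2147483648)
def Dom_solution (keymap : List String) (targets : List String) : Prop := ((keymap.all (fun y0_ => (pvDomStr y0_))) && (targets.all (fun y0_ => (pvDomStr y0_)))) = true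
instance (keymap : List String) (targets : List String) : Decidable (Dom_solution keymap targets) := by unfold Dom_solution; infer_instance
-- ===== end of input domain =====

-- B precomputes one per-character minimum-cost table and sums lookups per target,
-- replacing A's rescan of every keymap for every character of every target (objective: faster).

-- ===== PORT A =====
-- 'alpha in k' / 'k.index(alpha)' with alpha a single character are exactly
-- k.toList.contains alpha / k.toList.idxOf alpha (the index is only used under the membership guard).
def solution (keymap : List String) (targets : List String) : List Int :=
  let result := targets.foldl (fun result target =>
    let l := target.toList.foldl (fun l alpha =>
      let a := keymap.foldl (fun a k =>
        if k.toList.contains alpha then a ++ [((k.toList.idxOf alpha : Int) + 1)] else a)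
        ([] : List Int)
      if a.length = 0 then l ++ [(0 : Int)]
      else l ++ [(PySem.List.min? a (fun x => x)).getD 0]) ([] : List Int)
    if (0 : Int) ∈ l then result ++ [(0 : Int)] else result ++ [l.sum]) ([] : List Int)
  result.foldl (fun real r => if r = 0 then real ++ [(-1 : Int)] else real ++ [r]) []

-- ===== PORT B =====
def pvBest (keymap : List String) : PySem.Dict Char Int :=
  keymap.foldl (fun best k =>
    (PySem.List.enumerate k.toList 0).foldl (fun best p =>
      match best.get? p.2 with
      | none => best.insert p.2 (p.1 + 1)
      | some v => if p.1 + 1 < v then best.insert p.2 (p.1 + 1) else best) best)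
    PySem.Dict.empty

def pvCost (best : PySem.Dict Char Int) : List Char → Int → Int
  | [], total => if total > 0 then total else -1
  | c :: cs, total =>
    match best.get? c with
    | none => -1
    | some v => pvCost best cs (total + v)

def solution_alt (keymap : List String) (targets : List String) : List Int :=
  let best := pvBest keymap
  targets.map (fun t => pvCost best t.toList 0)

-- ===== PRECONDITION & SPEC =====
def Spec_solution (keymap : List String) (targets : List String) (out : List Int) : Prop := out = solution_alt keymap targets
instance (keymap : List String) (targets : List String) (out : List Int) : Decidable (Spec_solution keymap targets out) := by unfold Spec_solution; infer_instance

-- ===== CLAIM (what is proved, stated in full; the proofs are below) =====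
def Claim_equal_solution : Prop := ∀ (keymap : List String) (targets : List String), Dom_solution keymap targets → Spec_solution keymap targets (solution keymap targets)

-- ===== LEMMAS AND PROOFS =====

-- minimum on Option Int (none = no occurrence)
def pvM2 : Option Int → Option Int → Option Int
  | none, b => b
  | some x, none => some x
  | some x, some y => some (min x y)

-- cheapest press count for character c across the keymaps, as a recursion
def pvSpec (c : Char) : List String → Option Int
  | [] => none
  | k :: ks =>
      pvM2 (if k.toList.contains c then some ((k.toList.idxOf c : Int) + 1) else none) (pvSpec c ks)

def pvMfold (o : Option Int) (l : List Int) : Option Int :=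
  l.foldl (fun o x => pvM2 o (some x)) o

theorem pvM2_none_right (a : Option Int) : pvM2 a none = a := by cases a <;> rfl

theorem pvM2_assoc (a b c : Option Int) : pvM2 (pvM2 a b) c = pvM2 a (pvM2 b c) := by
  cases a <;> cases b <;> cases c <;> simp [pvM2, min_assoc]

theorem pvMfold_m2 (l : List Int) (o : Option Int) :
    pvMfold o l = pvM2 o (pvMfold none l) := by
  induction l generalizing o with
  | nil => simp [pvMfold, pvM2_none_right]
  | cons x t ih =>
      simp only [pvMfold, List.foldl_cons] at *
      rw [ih, ih (pvM2 none (some x))]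
      rw [pvM2_assoc]; rfl

theorem pvMfold_some (x : Int) (t : List Int) :
    pvMfold (some x) t = some (t.foldl min x) := by
  induction t generalizing x with
  | nil => rfl
  | cons y t ih => simp [pvMfold, pvM2] at *; exact ih (min x y)

-- B's per-keymap update step, named for the lemmas
def pvStep (best : PySem.Dict Char Int) (p : Int × Char) : PySem.Dict Char Int :=
  match best.get? p.2 with
  | none => best.insert p.2 (p.1 + 1)
  | some v => if p.1 + 1 < v then best.insert p.2 (p.1 + 1) else best

theorem pvStep_get (d : PySem.Dict Char Int) (p : Int × Char) (c : Char) :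
    (pvStep d p).get? c = pvM2 (d.get? c) (if p.2 = c then some (p.1 + 1) else none) := by
  unfold pvStep
  by_cases hc : p.2 = c
  · subst hc
    cases h : d.get? p.2 with
    | none => simp [PySem.Dict.get?_insert, h, pvM2]
    | some v =>
        by_cases hlt : p.1 + 1 < v
        · simp [hlt, PySem.Dict.get?_insert, h, pvM2]; omega
        · simp [hlt, h, pvM2]; omega
  · cases h : d.get? p.2 with
    | none => simp [PySem.Dict.get?_insert, h, Ne.symm hc, hc, pvM2_none_right]
    | some v =>
        by_cases hlt : p.1 + 1 < v
        · simp [hlt, PySem.Dict.get?_insert, h, Ne.symm hc, hc, pvM2_none_right]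
        · simp [hlt, h, hc, pvM2_none_right]

theorem pvMfold_none_cons (x : Int) (l : List Int) :
    pvMfold none (x :: l) = pvM2 (some x) (pvMfold none l) := by
  have : pvMfold none (x :: l) = pvMfold (some x) l := rfl
  rw [this, pvMfold_m2]

theorem pvInner (ps : List (Int × Char)) (d : PySem.Dict Char Int) (c : Char) :
    (ps.foldl pvStep d).get? c
      = pvM2 (d.get? c) (pvMfold none (ps.filterMap (fun p => if p.2 = c then some (p.1 + 1) else none))) := by
  induction ps generalizing d with
  | nil => simp [pvMfold, pvM2_none_right]
  | cons p ps ih =>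
      rw [List.foldl_cons, ih, pvStep_get]
      by_cases hc : p.2 = c
      · simp only [List.filterMap_cons, if_pos hc]
        rw [pvMfold_none_cons, ← pvM2_assoc]
      · simp only [List.filterMap_cons, if_neg hc]
        rw [pvM2_none_right]

theorem pvEnum (cs : List Char) (c : Char) (n : Int) :
    pvMfold none ((PySem.List.enumerate cs n).filterMap (fun p => if p.2 = c then some (p.1 + 1) else none))
      = if cs.contains c then some ((cs.idxOf c : Int) + n + 1) else none := by
  induction cs generalizing n with
  | nil => simp [PySem.List.enumerate_nil, pvMfold]
  | cons x cs ih =>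
      rw [PySem.List.enumerate_cons]
      simp only [List.filterMap_cons]
      by_cases hx : x = c
      · subst hx
        rw [if_pos rfl, pvMfold_none_cons, ih]
        have hm2 : (x :: cs).contains x = true := by simp
        rw [if_pos hm2, List.idxOf_cons_self]
        by_cases hmem : cs.contains x
        · rw [if_pos hmem]
          have h0 : (0 : Int) ≤ (cs.idxOf x : Int) := by positivity
          simp only [pvM2]
          congr 1
          push_cast
          omega
        · rw [if_neg (by simpa using hmem), pvM2_none_right]
          congr 1
          push_cast
          ring
      · rw [if_neg (by simpa using hx), ih]
        have hbeq : (x == c) = false := by simp [hx]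
        by_cases hmem : cs.contains c
        · rw [if_pos hmem]
          have hmem' : c ∈ cs := by simpa using hmem
          have hm2 : (x :: cs).contains c = true := by simp [hmem']
          rw [if_pos hm2]
          have hidx : List.idxOf c (x :: cs) = List.idxOf c cs + 1 := by simp [List.idxOf_cons, hbeq]
          rw [hidx]
          congr 1
          push_cast
          ring
        · rw [if_neg (by simpa using hmem)]
          have hmem' : c ∉ cs := by simpa using hmem
          have hm2 : ¬ ((x :: cs).contains c = true) := by
            simp only [List.contains_cons, Bool.or_eq_true, beq_iff_eq]
            rintro (h | h)
            · exact hx h.symm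
            · exact hmem' (by simpa using h)
          rw [if_neg hm2]

theorem pvBest_fold (ks : List String) (d : PySem.Dict Char Int) (c : Char) :
    (ks.foldl (fun best k => (PySem.List.enumerate k.toList 0).foldl pvStep best) d).get? c
      = pvM2 (d.get? c) (pvSpec c ks) := by
  induction ks generalizing d with
  | nil => simp [pvSpec, pvM2_none_right]
  | cons k ks ih =>
      rw [List.foldl_cons, ih, pvInner, pvEnum, pvM2_assoc]
      congr 1

theorem pvBest_get (keymap : List String) (c : Char) :
    (pvBest keymap).get? c = pvSpec c keymap := by
  have : pvBest keymap
      = keymap.foldl (fun best k => (PySem.List.enumerate k.toList 0).foldl pvStep best) PySem.Dict.empty := rfl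
  rw [this, pvBest_fold]
  simp [PySem.Dict.get?_empty, pvM2]

theorem pvSpec_pos (c : Char) (ks : List String) (v : Int) (h : pvSpec c ks = some v) : 1 ≤ v := by
  induction ks generalizing v with
  | nil => simp [pvSpec] at h
  | cons k kss ih =>
      simp only [pvSpec] at h
      by_cases hm : k.toList.contains c
      · simp only [hm, if_true] at h
        cases hr : pvSpec c kss with
        | none => rw [hr] at h; simp [pvM2] at h; omega
        | some w =>
            rw [hr] at h; simp only [pvM2, Option.some.injEq] at h
            have := ih w hr
            have hn : (0:Int) ≤ (k.toList.idxOf c : Int) := by positivity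
            omega
      · rw [if_neg (by simpa using hm)] at h
        exact ih v h

-- A's per-character value
def pvAList (keymap : List String) (c : Char) : List Int :=
  (keymap.filter (fun k => k.toList.contains c)).map (fun k => ((k.toList.idxOf c : Int) + 1))

def pvAVal (keymap : List String) (c : Char) : Int :=
  if (pvAList keymap c).length = 0 then 0
  else (PySem.List.min? (pvAList keymap c) (fun x => x)).getD 0

theorem pvAList_mfold (keymap : List String) (c : Char) :
    pvMfold none (pvAList keymap c) = pvSpec c keymap := by
  induction keymap with
  | nil => rfl
  | cons k ks ih =>
      simp only [pvAList, List.filter_cons, pvSpec] at *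
      by_cases hm : k.toList.contains c
      · simp only [hm, if_true, List.map_cons]
        rw [pvMfold_none_cons, ih]
      · simp only [hm, if_false, Bool.false_eq_true]
        rw [ih]
        rfl

theorem pvAVal_none (keymap : List String) (c : Char) (h : pvSpec c keymap = none) :
    pvAVal keymap c = 0 := by
  rw [← pvAList_mfold] at h
  cases ha : pvAList keymap c with
  | nil => simp [pvAVal, ha]
  | cons x t => rw [ha, pvMfold_none_cons] at h; cases hr : pvMfold none t <;> simp [hr, pvM2] at h

theorem pvAVal_some (keymap : List String) (c : Char) (v : Int) (h : pvSpec c keymap = some v) :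
    pvAVal keymap c = v := by
  rw [← pvAList_mfold] at h
  cases ha : pvAList keymap c with
  | nil => rw [ha] at h; simp [pvMfold] at h
  | cons x t =>
      have hx : pvMfold none (x :: t) = some (t.foldl min x) := by
        rw [pvMfold_none_cons, ← pvMfold_m2, pvMfold_some]
      rw [ha, hx] at h
      simp only [Option.some.injEq] at h
      simp [pvAVal, ha, PySem.List.min?_id_cons, h]

-- B per target when some character is missing
theorem pvCost_missing (keymap : List String) (cs : List Char) (total : Int)
    (h : ∃ c ∈ cs, pvSpec c keymap = none) :
    pvCost (pvBest keymap) cs total = -1 := by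
  induction cs generalizing total with
  | nil => simp at h
  | cons c cs ih =>
      simp only [pvCost, pvBest_get]
      cases hc : pvSpec c keymap with
      | none => rfl
      | some v =>
          obtain ⟨d, hd, hdn⟩ := h
          rcases List.mem_cons.mp hd with rfl | hmem
          · rw [hc] at hdn; exact absurd hdn (by simp)
          · exact ih _ ⟨d, hmem, hdn⟩

-- B per target when every character is present
theorem pvCost_all (keymap : List String) (cs : List Char) (total : Int)
    (h : ∀ c ∈ cs, pvSpec c keymap ≠ none) :
    pvCost (pvBest keymap) cs total
      = (if total + (cs.map (pvAVal keymap)).sum > 0 then total + (cs.map (pvAVal keymap)).sum else -1) := by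
  induction cs generalizing total with
  | nil => simp [pvCost]
  | cons c cs ih =>
      simp only [pvCost, pvBest_get]
      cases hc : pvSpec c keymap with
      | none => exact absurd hc (h c (List.mem_cons_self))
      | some v =>
          have hred : (match some v with
              | none => (-1 : Int)
              | some v => pvCost (pvBest keymap) cs (total + v)) = pvCost (pvBest keymap) cs (total + v) := rfl
          rw [hred, ih (total + v) (fun d hd => h d (List.mem_cons_of_mem c hd)),
            ← pvAVal_some keymap c v hc]
          simp only [List.map_cons, List.sum_cons]
          rw [add_assoc]

-- the per-target value of A, after its 0 → -1 post-pass
theorem pvTarget_eq (keymap : List String) (cs : List Char) :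
    (fun r => if r = 0 then (-1 : Int) else r)
        (if (0 : Int) ∈ cs.map (pvAVal keymap) then 0 else (cs.map (pvAVal keymap)).sum)
      = pvCost (pvBest keymap) cs 0 := by
  by_cases hmiss : ∃ c ∈ cs, pvSpec c keymap = none
  · rw [pvCost_missing keymap cs 0 hmiss]
    obtain ⟨c, hc, hcn⟩ := hmiss
    have h0 : (0 : Int) ∈ cs.map (pvAVal keymap) := by
      exact List.mem_map.mpr ⟨c, hc, pvAVal_none keymap c hcn⟩
    simp [h0]
  · push_neg at hmiss
    rw [pvCost_all keymap cs 0 hmiss]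
    have hpos : ∀ x ∈ cs.map (pvAVal keymap), 1 ≤ x := by
      intro x hx
      obtain ⟨c, hc, rfl⟩ := List.mem_map.mp hx
      cases hv : pvSpec c keymap with
      | none => exact absurd hv (hmiss c hc)
      | some v => rw [pvAVal_some keymap c v hv]; exact pvSpec_pos c keymap v hv
    have h0 : (0 : Int) ∉ cs.map (pvAVal keymap) := by
      intro hx; have := hpos 0 hx; omega
    have hsum : (0 : Int) ≤ (cs.map (pvAVal keymap)).sum :=
      List.sum_nonneg (fun x hx => by have := hpos x hx; omega)
    simp only [h0, if_false, zero_add]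
    by_cases hz : (cs.map (pvAVal keymap)).sum = 0
    · simp [hz]
    · have : (cs.map (pvAVal keymap)).sum > 0 := by omega
      simp [hz, this]

theorem solution_eq_map (keymap : List String) (targets : List String) :
    solution keymap targets
      = targets.map (fun t =>
          (fun r => if r = 0 then (-1 : Int) else r)
            (if (0 : Int) ∈ t.toList.map (pvAVal keymap) then 0 else (t.toList.map (pvAVal keymap)).sum)) := by
  unfold solution
  have hInner : ∀ (t : String) (l0 : List Int),
      t.toList.foldl (fun l alpha =>
        let a := keymap.foldl (fun a k =>
          if k.toList.contains alpha then a ++ [((k.toList.idxOf alpha : Int) + 1)] else a)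
          ([] : List Int)
        if a.length = 0 then l ++ [(0 : Int)]
        else l ++ [(PySem.List.min? a (fun x => x)).getD 0]) l0
      = l0 ++ t.toList.map (pvAVal keymap) := by
    intro t l0
    have hfun : (fun (l : List Int) (alpha : Char) =>
        let a := keymap.foldl (fun a k =>
          if k.toList.contains alpha then a ++ [((k.toList.idxOf alpha : Int) + 1)] else a)
          ([] : List Int)
        if a.length = 0 then l ++ [(0 : Int)]
        else l ++ [(PySem.List.min? a (fun x => x)).getD 0])
        = (fun (l : List Int) (alpha : Char) => l ++ [pvAVal keymap alpha]) := by
      funext l alpha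
      rw [show (keymap.foldl (fun a k =>
          if k.toList.contains alpha then a ++ [((k.toList.idxOf alpha : Int) + 1)] else a)
          ([] : List Int)) = pvAList keymap alpha from by
        rw [PySem.List.foldl_append_if]; rfl]
      simp only [pvAVal]
      split <;> rfl
    rw [hfun, PySem.List.foldl_append_singleton_eq_map]
  have houter : targets.foldl (fun result target =>
      let l := target.toList.foldl (fun l alpha =>
        let a := keymap.foldl (fun a k =>
          if k.toList.contains alpha then a ++ [((k.toList.idxOf alpha : Int) + 1)] else a)
          ([] : List Int)
        if a.length = 0 then l ++ [(0 : Int)]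
        else l ++ [(PySem.List.min? a (fun x => x)).getD 0]) ([] : List Int)
      if (0 : Int) ∈ l then result ++ [(0 : Int)] else result ++ [l.sum]) ([] : List Int)
      = targets.map (fun t =>
          if (0 : Int) ∈ t.toList.map (pvAVal keymap) then 0 else (t.toList.map (pvAVal keymap)).sum) := by
    have hfun2 : (fun (result : List Int) (target : String) =>
        let l := target.toList.foldl (fun l alpha =>
          let a := keymap.foldl (fun a k =>
            if k.toList.contains alpha then a ++ [((k.toList.idxOf alpha : Int) + 1)] else a)
            ([] : List Int)
          if a.length = 0 then l ++ [(0 : Int)]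
          else l ++ [(PySem.List.min? a (fun x => x)).getD 0]) ([] : List Int)
        if (0 : Int) ∈ l then result ++ [(0 : Int)] else result ++ [l.sum])
        = (fun (result : List Int) (target : String) => result ++
            [if (0 : Int) ∈ target.toList.map (pvAVal keymap) then 0 else (target.toList.map (pvAVal keymap)).sum]) := by
      funext result target
      simp only
      rw [hInner target []]
      simp only [List.nil_append]
      split <;> rfl
    rw [hfun2, PySem.List.foldl_append_singleton_eq_map, List.nil_append]
  show (targets.foldl (fun result target =>
      let l := target.toList.foldl (fun l alpha =>
        let a := keymap.foldl (fun a k =>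
          if k.toList.contains alpha then a ++ [((k.toList.idxOf alpha : Int) + 1)] else a)
          ([] : List Int)
        if a.length = 0 then l ++ [(0 : Int)]
        else l ++ [(PySem.List.min? a (fun x => x)).getD 0]) ([] : List Int)
      if (0 : Int) ∈ l then result ++ [(0 : Int)] else result ++ [l.sum]) ([] : List Int)).foldl
      (fun real r => if r = 0 then real ++ [(-1 : Int)] else real ++ [r]) [] = _
  rw [houter]
  have hfinal : ∀ (rs : List Int),
      rs.foldl (fun real r => if r = 0 then real ++ [(-1 : Int)] else real ++ [r]) []
        = rs.map (fun r => if r = 0 then (-1 : Int) else r) := by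
    intro rs
    have : (fun (real : List Int) (r : Int) => if r = 0 then real ++ [(-1 : Int)] else real ++ [r])
        = (fun (real : List Int) (r : Int) => real ++ [if r = 0 then (-1 : Int) else r]) := by
      funext real r; split <;> rfl
    rw [this, PySem.List.foldl_append_singleton_eq_map, List.nil_append]
  rw [hfinal, List.map_map]
  rfl

theorem solution_spec : Claim_equal_solution := by
  intro keymap targets _
  unfold Spec_solution solution_alt
  rw [solution_eq_map]
  simp only
  apply List.map_congr_left
  intro t _
  exact pvTarget_eq keymap t.toList
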